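-- pv_equiv track=rewrite | github.com/almubarok/belajar_python | quizzz/find_valid_numbers_v2.py | find_valid_numbers_v2
-- ===== SOURCE A (Python) =====
-- def find_valid_numbers_v2(n, m):
-- 		valid_numbers = []
-- 		current = m + 1  # Start checking from the number after m
--
-- 		while len(valid_numbers) < n:
-- 				if current % 3 == 0 and current % 4 != 0:
-- 						valid_numbers.append(current)
-- 				current += 1
--
-- 		return valid_numbers
-- ===== SOURCE B (Python) =====
-- def find_valid_numbers_v2(n, m):
--     t = 3 * (m // 3 + 1)          # first multiple of 3 strictly greater than m
--     o = (-(t // 3)) % 4           # index of the first multiple-of-12 position in t, t+3, t+6, ...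
--     return [t + 3 * (i + (i + 3 - o) // 3) for i in range(n)]
-- ===== Notes on version B (the rewrite author's own statement) =====
-- stated objective: faster
-- what changed: B replaces A's while-loop scan of every integer with a loop-free closed form: the i-th valid number is computed directly as t + 3*(i + (i+3-o)//3) from the first multiple of 3 after m, emitted by a single comprehension over range(n).
import Mathlib
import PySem

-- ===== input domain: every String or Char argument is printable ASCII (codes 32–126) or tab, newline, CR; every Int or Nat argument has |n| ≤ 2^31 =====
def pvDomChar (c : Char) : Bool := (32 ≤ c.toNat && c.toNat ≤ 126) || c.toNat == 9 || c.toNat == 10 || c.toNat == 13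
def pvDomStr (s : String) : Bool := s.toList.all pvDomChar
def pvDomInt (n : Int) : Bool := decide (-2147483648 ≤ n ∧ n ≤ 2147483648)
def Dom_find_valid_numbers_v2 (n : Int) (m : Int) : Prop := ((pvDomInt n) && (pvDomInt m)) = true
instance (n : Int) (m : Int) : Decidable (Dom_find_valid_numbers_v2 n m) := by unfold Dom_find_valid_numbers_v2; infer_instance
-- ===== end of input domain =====

-- B replaces A's scan loop by a closed-form comprehension: the i-th result is computed
-- directly from i by integer arithmetic, with no search loop at all (objective: faster).

-- ===== PORT A =====
-- A's while loop: check every integer, append when divisible by 3 and not by 4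
-- (fuel = Nat recursion guard only; 6*(n.toNat+1) steps always suffice, proved by fvLoop_eq below)
def fvLoopA (fuel : Nat) (n : Int) (acc : List Int) (current : Int) : List Int :=
  match fuel with
  | 0 => acc
  | f + 1 =>
    if (acc.length : Int) < n then
      if PySem.Int.mod current 3 = 0 ∧ ¬ PySem.Int.mod current 4 = 0 then
        fvLoopA f n (acc ++ [current]) (current + 1)
      else
        fvLoopA f n acc (current + 1)
    else acc

def find_valid_numbers_v2 (n : Int) (m : Int) : List Int :=
  fvLoopA (6 * (n.toNat + 1)) n [] (m + 1)

-- ===== PORT B =====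
-- Source B: t = first multiple of 3 > m; o = index of the first multiple-of-12 among t, t+3, …;
-- the i-th answer is t + 3*(i + (i+3-o)//3), emitted by a comprehension over range(n)
def find_valid_numbers_v2_alt (n : Int) (m : Int) : List Int :=
  let t := 3 * (PySem.Int.floordiv m 3 + 1)
  let o := PySem.Int.mod (-(PySem.Int.floordiv t 3)) 4
  (PySem.List.pyRange 0 n 1).map (fun i => t + 3 * (i + PySem.Int.floordiv (i + 3 - o) 3))

-- ===== PRECONDITION & SPEC =====
def Spec_find_valid_numbers_v2 (n : Int) (m : Int) (out : List Int) : Prop := out = find_valid_numbers_v2_alt n m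
instance (n : Int) (m : Int) (out : List Int) : Decidable (Spec_find_valid_numbers_v2 n m out) := by unfold Spec_find_valid_numbers_v2; infer_instance

-- ===== CLAIM (what is proved, stated in full; the proofs are below) =====
def Claim_equal_find_valid_numbers_v2 : Prop := ∀ (n : Int) (m : Int), Dom_find_valid_numbers_v2 n m → Spec_find_valid_numbers_v2 n m (find_valid_numbers_v2 n m)

-- ===== LEMMAS AND PROOFS =====

-- proof intermediary: a walk over the multiples of 3 (used only to relate the two ports)
def fvLoopB (fuel : Nat) (n : Int) (acc : List Int) (current : Int) : List Int :=
  match fuel with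
  | 0 => acc
  | f + 1 =>
    if (acc.length : Int) < n then
      if ¬ PySem.Int.mod current 4 = 0 then
        fvLoopB f n (acc ++ [current]) (current + 3)
      else
        fvLoopB f n acc (current + 3)
    else acc

-- distance (0..5, read off c % 12) from c to the next integer divisible by 3 and not by 4
def fvDist (c : Int) : Nat := [3, 2, 1, 0, 2, 1, 0, 2, 1, 0, 5, 4].getD (c % 12).toNat 0

theorem fvDist_le (c : Int) : fvDist c ≤ 5 := by
  have h12 : (c % 12).toNat = 0 ∨ (c % 12).toNat = 1 ∨ (c % 12).toNat = 2 ∨ (c % 12).toNat = 3 ∨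
      (c % 12).toNat = 4 ∨ (c % 12).toNat = 5 ∨ (c % 12).toNat = 6 ∨ (c % 12).toNat = 7 ∨
      (c % 12).toNat = 8 ∨ (c % 12).toNat = 9 ∨ (c % 12).toNat = 10 ∨ (c % 12).toNat = 11 := by
    omega
  unfold fvDist
  rcases h12 with h|h|h|h|h|h|h|h|h|h|h|h <;> simp [h]

theorem fvDist_valid (c : Int) (h : c % 3 = 0 ∧ ¬ c % 4 = 0) : fvDist c = 0 := by
  have h12 : c % 12 = 3 ∨ c % 12 = 6 ∨ c % 12 = 9 := by omega
  unfold fvDist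
  rcases h12 with h|h|h <;> simp [h]

theorem fvDist_succ (c : Int) (h : ¬ (c % 3 = 0 ∧ ¬ c % 4 = 0)) :
    fvDist c = fvDist (c + 1) + 1 := by
  have h12 : c % 12 = 0 ∨ c % 12 = 1 ∨ c % 12 = 2 ∨ c % 12 = 4 ∨ c % 12 = 5 ∨
      c % 12 = 7 ∨ c % 12 = 8 ∨ c % 12 = 10 ∨ c % 12 = 11 := by omega
  unfold fvDist
  rcases h12 with h|h|h|h|h|h|h|h|h <;>
    (have h' : (c + 1) % 12 = c % 12 + 1 ∨ (c + 1) % 12 = 0 := by omega) <;>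
    rcases h' with h'|h' <;> simp [h, h'] <;> omega

-- once enough numbers are collected, fvLoopB returns acc for EVERY fuel
theorem fvLoopB_stop (fb : Nat) (n : Int) (acc : List Int) (d : Int)
    (h : ¬ (acc.length : Int) < n) : fvLoopB fb n acc d = acc := by
  cases fb <;> simp [fvLoopB, h]

-- A's scan from c equals the multiples-of-3 walk from d whenever d is the first multiple
-- of 3 ≥ c, provided each side's fuel covers its remaining work
theorem fvLoop_eq (n : Int) : ∀ (fa fb : Nat) (acc : List Int) (c d : Int),
    6 * (n - acc.length).toNat + fvDist c ≤ fa →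
    2 * (n - acc.length).toNat + (if d % 4 = 0 then 1 else 0) ≤ fb →
    d % 3 = 0 → c ≤ d → d < c + 3 →
    fvLoopA fa n acc c = fvLoopB fb n acc d := by
  intro fa
  induction fa with
  | zero =>
    intro fb acc c d hA hB hd3 hle hlt3
    have hstop : ¬ (acc.length : Int) < n := by omega
    rw [fvLoopB_stop fb n acc d hstop]
    rfl
  | succ f ih =>
    intro fb acc c d hA hB hd3 hle hlt3
    by_cases hlen : (acc.length : Int) < n
    · have hx : 1 ≤ (n - acc.length).toNat := by omega
      obtain ⟨fb', rfl⟩ : ∃ fb', fb = fb' + 1 := ⟨fb - 1, by omega⟩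
      have e3 : PySem.Int.mod c 3 = c % 3 := PySem.Int.mod_eq_emod_of_pos (by omega)
      have e4 : PySem.Int.mod c 4 = c % 4 := PySem.Int.mod_eq_emod_of_pos (by omega)
      by_cases hv : PySem.Int.mod c 3 = 0 ∧ ¬ PySem.Int.mod c 4 = 0
      · -- c is valid: d = c, both append it
        have hv' : c % 3 = 0 ∧ ¬ c % 4 = 0 := by rw [← e3, ← e4]; exact hv
        have hdc : d = c := by omega
        subst hdc
        show fvLoopA (f + 1) n acc d = fvLoopB (fb' + 1) n acc d
        rw [fvLoopA, fvLoopB, if_pos hlen, if_pos hlen, if_pos hv, if_pos hv.2]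
        have hd0 : fvDist d = 0 := fvDist_valid d hv'
        have hd1 : fvDist (d + 1) ≤ 5 := fvDist_le (d + 1)
        refine ih fb' (acc ++ [d]) (d + 1) (d + 3) ?_ ?_ (by omega) (by omega) (by omega)
        · simp only [List.length_append, List.length_cons, List.length_nil]
          push_cast
          omega
        · simp only [List.length_append, List.length_cons, List.length_nil]
          push_cast
          split_ifs at hB ⊢ <;> omega
      · -- c is not valid: A skips it
        have hv' : ¬ (c % 3 = 0 ∧ ¬ c % 4 = 0) := by rw [← e3, ← e4]; exact hv
        have hsucc : fvDist c = fvDist (c + 1) + 1 := fvDist_succ c hv'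
        show fvLoopA (f + 1) n acc c = fvLoopB (fb' + 1) n acc d
        rw [fvLoopA, if_pos hlen, if_neg hv]
        by_cases h3 : c % 3 = 0
        · -- c is a multiple of 3 divisible by 4: d = c and the walk skips it too
          have hdc : d = c := by omega
          subst hdc
          have hm4 : d % 4 = 0 := by
            rcases (not_and_or.mp hv') with h | h
            · exact absurd h3 h
            · exact not_not.mp h
          have hm4' : ¬ ¬ PySem.Int.mod d 4 = 0 := by rw [e4]; omega
          rw [fvLoopB, if_pos hlen, if_neg hm4']
          refine ih fb' acc (d + 1) (d + 3) (by omega) ?_ (by omega) (by omega) (by omega)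
          have : ¬ (d + 3) % 4 = 0 := by omega
          rw [if_neg this]
          rw [if_pos hm4] at hB
          omega
        · -- c is not a multiple of 3: d is still the first multiple of 3 ≥ c + 1
          refine ih (fb' + 1) acc (c + 1) d (by omega) hB hd3 (by omega) (by omega)
    · rw [fvLoopB_stop (fb) n acc d hlen]
      show fvLoopA (f + 1) n acc c = acc
      rw [fvLoopA, if_neg hlen]

-- closed form of one step of B's arithmetic: the value at index 0 is the start itself …
theorem fvG_zero (e : Int) (h4 : ¬ (3*e) % 4 = 0) :
    3*e + 3 * ((0:Int) + (0 + 3 - (-e) % 4) / 3) = 3*e := by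
  have h : e % 4 = 0 ∨ e % 4 = 1 ∨ e % 4 = 2 ∨ e % 4 = 3 := by omega
  rcases h with h|h|h|h <;> omega

-- … after appending, shifting the start by 3 shifts the index by 1 …
theorem fvG_succ (e : Int) (i : Nat) (h4 : ¬ (3*e) % 4 = 0) :
    3*e + 3 * (((i:Int)+1) + (((i:Int)+1) + 3 - (-e) % 4) / 3)
      = 3*(e+1) + 3 * ((i:Int) + ((i:Int) + 3 - (-(e+1)) % 4) / 3) := by
  have h : e % 4 = 0 ∨ e % 4 = 1 ∨ e % 4 = 2 ∨ e % 4 = 3 := by omega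
  rcases h with h|h|h|h <;> omega

-- … and skipping a multiple of 12 leaves every value unchanged
theorem fvG_skip (e : Int) (i : Nat) (h4 : (3*e) % 4 = 0) :
    3*e + 3 * ((i:Int) + ((i:Int) + 3 - (-e) % 4) / 3)
      = 3*(e+1) + 3 * ((i:Int) + ((i:Int) + 3 - (-(e+1)) % 4) / 3) := by
  have h : e % 4 = 0 ∨ e % 4 = 1 ∨ e % 4 = 2 ∨ e % 4 = 3 := by omega
  rcases h with h|h|h|h <;> omega

-- the multiples-of-3 walk computes B's closed form
theorem fvLoopB_closed (n : Int) : ∀ (fb : Nat) (acc : List Int) (e : Int),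
    2 * (n - acc.length).toNat + (if (3*e) % 4 = 0 then 1 else 0) ≤ fb →
    fvLoopB fb n acc (3*e) =
      acc ++ (List.range (n - acc.length).toNat).map
        (fun (i : Nat) => 3*e + 3 * ((i:Int) + ((i:Int) + 3 - (-e) % 4) / 3)) := by
  intro fb
  induction fb with
  | zero =>
    intro acc e hfuel
    have h0 : (n - acc.length).toNat = 0 := by split_ifs at hfuel <;> omega
    simp [fvLoopB, h0]
  | succ f ih =>
    intro acc e hfuel
    by_cases hlen : (acc.length : Int) < n
    · have hk : 1 ≤ (n - acc.length).toNat := by omega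
      obtain ⟨k', hk'⟩ : ∃ k', (n - acc.length).toNat = k' + 1 := ⟨_, (Nat.succ_pred_eq_of_pos hk).symm⟩
      have e4 : PySem.Int.mod (3*e) 4 = (3*e) % 4 := PySem.Int.mod_eq_emod_of_pos (by omega)
      by_cases h4 : (3*e) % 4 = 0
      · -- 3e is a multiple of 12: skip it, the closed form is unchanged
        have h4' : ¬ ¬ PySem.Int.mod (3*e) 4 = 0 := by rw [e4]; omega
        rw [fvLoopB, if_pos hlen, if_neg h4']
        have hnext : (3:Int)*e + 3 = 3*(e+1) := by ring
        rw [hnext, ih acc (e+1) ?side]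
        case side =>
          have : ¬ (3*(e+1)) % 4 = 0 := by omega
          rw [if_neg this]
          rw [if_pos h4] at hfuel
          omega
        congr 1
        exact List.map_congr_left fun i _ => (fvG_skip e i h4).symm
      · -- 3e is kept: it is the index-0 value, the rest re-indexes from 3(e+1)
        have h4' : ¬ PySem.Int.mod (3*e) 4 = 0 := by rw [e4]; omega
        rw [fvLoopB, if_pos hlen, if_pos h4']
        have hnext : (3:Int)*e + 3 = 3*(e+1) := by ring
        rw [hnext, ih (acc ++ [3*e]) (e+1) ?side]
        case side =>
          have hlen' : ((acc ++ [3*e]).length : Int) = acc.length + 1 := by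
            simp
          split_ifs <;> simp_all <;> omega
        have hlen2 : (n - (acc ++ [3*e]).length).toNat = k' := by
          simp only [List.length_append, List.length_cons, List.length_nil]
          omega
        rw [hlen2, hk', List.append_assoc]
        congr 1
        rw [List.range_succ_eq_map, List.map_cons, List.map_map,
          List.singleton_append]
        congr 1
        · have := fvG_zero e h4
          push_cast
          omega
        · refine List.map_congr_left fun i _ => ?_
          simp only [Function.comp]
          have := fvG_succ e i h4
          push_cast at this ⊢
          omega
    · rw [fvLoopB_stop (f+1) n acc (3*e) hlen]
      have h0 : (n - acc.length).toNat = 0 := by omega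
      simp [h0]

-- ===== VERDICT (by name: the statement is the Claim_ definition above) =====
theorem find_valid_numbers_v2_spec : Claim_equal_find_valid_numbers_v2 := by
  intro n m _
  unfold Spec_find_valid_numbers_v2 find_valid_numbers_v2 find_valid_numbers_v2_alt
  have hfd : PySem.Int.floordiv m 3 = m / 3 := PySem.Int.floordiv_eq_ediv_of_pos (by omega)
  set e : Int := m / 3 + 1 with he
  have ht : 3 * (PySem.Int.floordiv m 3 + 1) = 3 * e := by rw [hfd]
  have hdiv : PySem.Int.floordiv (3 * e) 3 = e := by
    rw [PySem.Int.floordiv_eq_ediv_of_pos (by omega)]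
    omega
  have hdle := fvDist_le (m + 1)
  have step1 : fvLoopA (6 * (n.toNat + 1)) n [] (m + 1)
      = fvLoopB (2 * (n.toNat + 1)) n [] (3 * e) := by
    refine fvLoop_eq n _ _ [] (m + 1) (3 * e) ?_ ?_ (by omega) (by omega) (by omega)
    · simp only [List.length_nil]
      push_cast
      omega
    · simp only [List.length_nil]
      push_cast
      split_ifs <;> omega
  have step2 := fvLoopB_closed n (2 * (n.toNat + 1)) [] e
    (by simp only [List.length_nil]; push_cast; split_ifs <;> omega)
  rw [step1, step2]
  simp only [List.length_nil, List.nil_append, Int.natCast_zero, sub_zero]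
  rw [ht, hdiv, PySem.List.pyRange_one, List.map_map]
  have hmod : PySem.Int.mod (-e) 4 = (-e) % 4 := PySem.Int.mod_eq_emod_of_pos (by omega)
  have hsub : ((n : Int) - 0).toNat = n.toNat := by omega
  rw [hsub]
  refine List.map_congr_left fun i _ => ?_
  simp only [Function.comp, zero_add]
  rw [hmod, PySem.Int.floordiv_eq_ediv_of_pos (by omega)]
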